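-- pv_equiv track=rewrite | github.com/JadenKim-dev/algorithm-study | boj/어항_정리/index.py | reverse_mapping_magic1
-- ===== SOURCE A (Python) =====
-- from math import sqrt, floor
--
-- INF = int(1e9); NULL = -1
--
-- def reverse_mapping_magic1(N):
--     n = floor(sqrt(N))
--     arr_to_board_map = [NULL]*N
--     if n**2 == N:
--         for i in range(N):
--             arr_to_board_map[i] = (n-1-i%n, i//n)
--     elif n**2 < N < n**2+n:
--         for i in range(N):
--             if i < n**2:
--                 arr_to_board_map[i] = (n-1-i%n, i//n)
--             else:
--                 arr_to_board_map[i] = (n-1, n+(i-n**2))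
--     else:
--         for i in range(N):
--             if i < n**2 + n:
--                 arr_to_board_map[i] = (n - i%(n+1), i//(n+1))
--             else:
--                 arr_to_board_map[i] = (n, i-n**2)
--     return arr_to_board_map
-- ===== SOURCE B (Python) =====
-- from math import sqrt, floor
--
-- def reverse_mapping_magic1(N):
--     # Build the mapping in board fill order: column by column, each column
--     # bottom-to-top, then the tail cells of the partial row.
--     n = floor(sqrt(N))
--     out = []
--     if n * n == N:
--         for col in range(n):
--             for row in range(n - 1, -1, -1):
--                 out.append((row, col))
--     elif N < n * n + n:
--         for col in range(n):
--             for row in range(n - 1, -1, -1):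
--                 out.append((row, col))
--         for col in range(n, N - n * n + n):
--             out.append((n - 1, col))
--     else:
--         for col in range(n):
--             for row in range(n, -1, -1):
--                 out.append((row, col))
--         for col in range(n, N - n * n):
--             out.append((n, col))
--     return out
-- ===== Notes on version B (the rewrite author's own statement) =====
-- stated objective: alternative
-- what changed: B builds the list in board fill order with nested column/row loops plus a tail loop (appending cells), instead of A's single index loop computing each coordinate by a closed-form mod/div formula.
import Mathlib
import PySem

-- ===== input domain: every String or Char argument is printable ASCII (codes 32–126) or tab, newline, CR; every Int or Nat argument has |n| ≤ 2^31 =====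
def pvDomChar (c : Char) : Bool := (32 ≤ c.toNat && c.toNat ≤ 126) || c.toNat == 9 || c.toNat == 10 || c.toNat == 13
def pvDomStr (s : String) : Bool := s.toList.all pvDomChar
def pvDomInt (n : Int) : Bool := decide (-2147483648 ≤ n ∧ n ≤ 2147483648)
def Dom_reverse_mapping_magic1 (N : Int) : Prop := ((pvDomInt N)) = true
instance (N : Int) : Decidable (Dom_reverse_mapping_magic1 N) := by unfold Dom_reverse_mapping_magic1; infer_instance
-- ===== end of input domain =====

-- B builds the list in board fill order (nested column/row loops plus a tail loop)
-- instead of A's single index loop with a closed-form mod/div formula: an alternative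
-- decomposition of the same O(N) construction.

-- ===== PORT A =====
-- floor(sqrt(N)): on the admitted domain (0 ≤ N ≤ 2^31) Python's floor(sqrt(N))
-- equals the integer square root, ported as Nat.sqrt (exact there).
def pySqrtFloor (N : Int) : Int := (Nat.sqrt N.toNat : Int)

-- port of A
def reverse_mapping_magic1 (N : Int) : List (Int × Int) :=
  let n : Int := pySqrtFloor N
  if n ^ 2 = N then
    (PySem.List.pyRange 0 N 1).map
      (fun i => (n - 1 - PySem.Int.mod i n, PySem.Int.floordiv i n))
  else if n ^ 2 < N ∧ N < n ^ 2 + n then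
    (PySem.List.pyRange 0 N 1).map (fun i =>
      if i < n ^ 2 then (n - 1 - PySem.Int.mod i n, PySem.Int.floordiv i n)
      else (n - 1, n + (i - n ^ 2)))
  else
    (PySem.List.pyRange 0 N 1).map (fun i =>
      if i < n ^ 2 + n then (n - PySem.Int.mod i (n + 1), PySem.Int.floordiv i (n + 1))
      else (n, i - n ^ 2))

-- ===== PORT B =====
def reverse_mapping_magic1_alt (N : Int) : List (Int × Int) :=
  let n : Int := pySqrtFloor N
  if n * n = N then
    (PySem.List.pyRange 0 n 1).foldl (fun acc col =>
      (PySem.List.pyRange (n - 1) (-1) (-1)).foldl (fun a row => a ++ [(row, col)]) acc) []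
  else if N < n * n + n then
    let out := (PySem.List.pyRange 0 n 1).foldl (fun acc col =>
      (PySem.List.pyRange (n - 1) (-1) (-1)).foldl (fun a row => a ++ [(row, col)]) acc) []
    (PySem.List.pyRange n (N - n * n + n) 1).foldl (fun a col => a ++ [(n - 1, col)]) out
  else
    let out := (PySem.List.pyRange 0 n 1).foldl (fun acc col =>
      (PySem.List.pyRange n (-1) (-1)).foldl (fun a row => a ++ [(row, col)]) acc) []
    (PySem.List.pyRange n (N - n * n) 1).foldl (fun a col => a ++ [(n, col)]) out

-- ===== PRECONDITION & SPEC =====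
-- Pre_: Python's math.sqrt raises ValueError on negative N, so both A and B raise for N < 0.
def Pre_reverse_mapping_magic1 (N : Int) : Prop := 0 ≤ N
instance (N : Int) : Decidable (Pre_reverse_mapping_magic1 N) := by unfold Pre_reverse_mapping_magic1; infer_instance

def pvWitness_reverse_mapping_magic1 : Int := 7

def Spec_reverse_mapping_magic1 (N : Int) (out : List (Int × Int)) : Prop := out = reverse_mapping_magic1_alt N
instance (N : Int) (out : List (Int × Int)) : Decidable (Spec_reverse_mapping_magic1 N out) := by unfold Spec_reverse_mapping_magic1; infer_instance

-- ===== CLAIM (what is proved, stated in full; the proofs are below) =====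
def Claim_equal_reverse_mapping_magic1 : Prop := ∀ (N : Int), Dom_reverse_mapping_magic1 N → Pre_reverse_mapping_magic1 N → Spec_reverse_mapping_magic1 N (reverse_mapping_magic1 N)

-- ===== LEMMAS AND PROOFS =====

theorem foldl_app_singleton {α β : Type} (l : List α) (f : α → β) (acc : List β) :
    l.foldl (fun a x => a ++ [f x]) acc = acc ++ l.map f := by
  induction l generalizing acc with
  | nil => simp
  | cons x xs ih => simp [List.foldl, ih]

theorem column_eq (m : Int) (hm : 0 < m) (c : Int) :
    (PySem.List.pyRange (c * m) (c * m + m) 1).map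
      (fun i => (m - 1 - PySem.Int.mod i m, PySem.Int.floordiv i m))
      = (PySem.List.pyRange (m - 1) (-1) (-1)).map (fun r => (r, c)) := by
  rw [PySem.List.pyRange_one, PySem.List.pyRange_neg_one]
  have hlen : (c * m + m - c * m).toNat = (m - 1 - (-1)).toNat := by omega
  rw [hlen, List.map_map, List.map_map]
  apply List.map_congr_left
  intro k hk
  have hkm : (k : Int) < m := by have := List.mem_range.mp hk; omega
  have hk0 : (0 : Int) ≤ (k : Int) := Int.natCast_nonneg k
  have hmod : PySem.Int.mod (c * m + k) m = k := by
    rw [PySem.Int.mod_eq_emod_of_pos hm,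
      show c * m + (k : Int) = (k : Int) + m * c by ring, Int.add_mul_emod_self_left]
    exact Int.emod_eq_of_lt hk0 hkm
  have hdiv : PySem.Int.floordiv (c * m + k) m = c := by
    rw [PySem.Int.floordiv_eq_iff_of_pos hm]
    constructor <;> nlinarith
  simp only [Function.comp, hmod, hdiv]

theorem block_eq (m : Int) (hm : 0 < m) (c : Nat) :
    (PySem.List.pyRange 0 ((c : Int) * m) 1).map
      (fun i => (m - 1 - PySem.Int.mod i m, PySem.Int.floordiv i m))
      = (PySem.List.pyRange 0 (c : Int) 1).flatMap
          (fun col => (PySem.List.pyRange (m - 1) (-1) (-1)).map (fun r => (r, col))) := by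
  induction c with
  | zero => simp [PySem.List.pyRange_one_eq_nil]
  | succ k ih =>
    have h1 : ((k + 1 : Nat) : Int) * m = (k : Int) * m + m := by push_cast; ring
    have ha : (0 : Int) ≤ (k : Int) * m := by positivity
    have hb : (k : Int) * m ≤ (k : Int) * m + m := by omega
    have hsplit : PySem.List.pyRange 0 (((k + 1 : Nat) : Int) * m) 1
        = PySem.List.pyRange 0 ((k : Int) * m) 1
          ++ PySem.List.pyRange ((k : Int) * m) ((k : Int) * m + m) 1 := by
      rw [h1]; exact PySem.List.pyRange_one_append 0 ((k : Int) * m) ((k : Int) * m + m) ha hb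
    have hc1 : (0 : Int) ≤ (k : Int) := Int.natCast_nonneg k
    have hsplit2 : PySem.List.pyRange 0 ((k + 1 : Nat) : Int) 1
        = PySem.List.pyRange 0 (k : Int) 1 ++ [(k : Int)] := by
      push_cast; exact PySem.List.pyRange_one_succ_right hc1
    rw [hsplit, List.map_append, ih, hsplit2, List.flatMap_append]
    simp [column_eq m hm (k : Int)]

theorem tail_eq (a b shift r : Int) :
    (PySem.List.pyRange a b 1).map (fun i => (r, i + shift)) =
    (PySem.List.pyRange (a + shift) (b + shift) 1).map (fun col => (r, col)) := by
  rw [PySem.List.pyRange_one, PySem.List.pyRange_one]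
  have h : (b + shift - (a + shift)).toNat = (b - a).toNat := by omega
  rw [h, List.map_map, List.map_map]
  apply List.map_congr_left
  intro k _
  simp only [Function.comp, Prod.mk.injEq]
  exact ⟨trivial, by ring⟩

theorem foldl_nested_cols (outer inner : List Int) (init : List (Int × Int)) :
    outer.foldl (fun acc col => inner.foldl (fun a row => a ++ [(row, col)]) acc) init
      = init ++ outer.flatMap (fun col => inner.map (fun r => (r, col))) := by
  induction outer generalizing init with
  | nil => simp
  | cons x xs ih =>
    rw [List.foldl_cons, foldl_app_singleton, ih]
    simp [List.flatMap]

theorem reverse_mapping_magic1_eq (N : Int) (hN : 0 ≤ N) :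
    reverse_mapping_magic1 N = reverse_mapping_magic1_alt N := by
  unfold reverse_mapping_magic1 reverse_mapping_magic1_alt
  set n : Int := pySqrtFloor N with hn
  obtain ⟨c, hc⟩ : ∃ c : Nat, n = (c : Int) := ⟨Nat.sqrt N.toNat, rfl⟩
  have hn0 : 0 ≤ n := by rw [hc]; exact Int.natCast_nonneg c
  have hnsq : n * n ≤ N := by
    have h1 : ((N.toNat.sqrt ^ 2 : Nat) : Int) ≤ ((N.toNat : Nat) : Int) :=
      Int.ofNat_le.mpr (Nat.sqrt_le' N.toNat)
    rw [Int.toNat_of_nonneg hN] at h1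
    push_cast at h1
    have h2 : (N.toNat.sqrt : Int) = n := by rw [hn]; rfl
    nlinarith [h1, h2]
  have hub : N < (n + 1) * (n + 1) := by
    have h1 : ((N.toNat : Nat) : Int) < (((N.toNat.sqrt + 1) ^ 2 : Nat) : Int) :=
      Int.ofNat_lt.mpr (Nat.lt_succ_sqrt' N.toNat)
    rw [Int.toNat_of_nonneg hN] at h1
    push_cast at h1
    have h2 : (N.toNat.sqrt : Int) = n := by rw [hn]; rfl
    nlinarith [h1, h2]
  by_cases h1 : n ^ 2 = N
  · rw [if_pos h1, if_pos (by nlinarith : n * n = N)]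
    rw [foldl_nested_cols, List.nil_append]
    by_cases hz : n = 0
    · have : N = 0 := by nlinarith
      simp [this, hz, PySem.List.pyRange_one_eq_nil]
    · have hpos : 0 < n := lt_of_le_of_ne hn0 (Ne.symm hz)
      have hNe : N = (c : Int) * n := by rw [← hc]; nlinarith
      rw [hNe, block_eq n hpos c, hc]
  · rw [if_neg h1]
    have hlt : n * n < N := lt_of_le_of_ne hnsq (fun h => h1 (by nlinarith))
    have hpos : 0 < n := by nlinarith
    by_cases h2 : N < n ^ 2 + n
    · rw [if_pos ⟨by nlinarith, h2⟩, if_neg (by nlinarith : ¬ n * n = N),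
          if_pos (by nlinarith : N < n * n + n)]
      rw [foldl_nested_cols, List.nil_append, foldl_app_singleton]
      have hsplit : PySem.List.pyRange 0 N 1
          = PySem.List.pyRange 0 (n ^ 2) 1 ++ PySem.List.pyRange (n ^ 2) N 1 :=
        PySem.List.pyRange_one_append 0 (n ^ 2) N (by positivity) (by nlinarith)
      rw [hsplit, List.map_append]
      congr 1
      · rw [List.map_congr_left (fun i hi => by
          rw [if_pos (PySem.List.mem_pyRange_one.mp hi).2])]
        have hne : n ^ 2 = (c : Int) * n := by rw [← hc]; ring
        rw [hne, block_eq n hpos c, hc]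
      · rw [List.map_congr_left (g := fun i => ((n - 1 : Int), i + (n - n ^ 2))) (fun i hi => by
          rw [if_neg (by
            have := (PySem.List.mem_pyRange_one.mp hi).1; omega)]
          simp only [Prod.mk.injEq]; exact ⟨trivial, by ring⟩)]
        rw [tail_eq (n ^ 2) N (n - n ^ 2) (n - 1)]
        have e1 : n ^ 2 + (n - n ^ 2) = n := by ring
        have e2 : N + (n - n ^ 2) = N - n * n + n := by ring
        rw [e1, e2]
    · rw [if_neg (fun h => h2 h.2), if_neg (by nlinarith : ¬ n * n = N),
          if_neg (by push_neg; push_neg at h2; nlinarith : ¬ N < n * n + n)]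
      rw [foldl_nested_cols, List.nil_append, foldl_app_singleton]
      push_neg at h2
      have hm1 : 0 < n + 1 := by omega
      have hsplit : PySem.List.pyRange 0 N 1
          = PySem.List.pyRange 0 (n ^ 2 + n) 1 ++ PySem.List.pyRange (n ^ 2 + n) N 1 :=
        PySem.List.pyRange_one_append 0 (n ^ 2 + n) N (by positivity) h2
      rw [hsplit, List.map_append]
      congr 1
      · rw [List.map_congr_left
            (g := fun i => ((n + 1) - 1 - PySem.Int.mod i (n + 1), PySem.Int.floordiv i (n + 1)))
            (fun i hi => by
          rw [if_pos (PySem.List.mem_pyRange_one.mp hi).2]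
          simp only [Prod.mk.injEq]; exact ⟨by ring, trivial⟩)]
        have hne : n ^ 2 + n = (c : Int) * (n + 1) := by rw [← hc]; ring
        rw [hne, block_eq (n + 1) hm1 c, hc]
        have e : (c : Int) + 1 - 1 = (c : Int) := by ring
        rw [e]
      · rw [List.map_congr_left (g := fun i => (n, i + (-(n ^ 2)))) (fun i hi => by
          rw [if_neg (by
            have := (PySem.List.mem_pyRange_one.mp hi).1; omega)]
          simp only [Prod.mk.injEq]; exact ⟨trivial, by ring⟩)]
        rw [tail_eq (n ^ 2 + n) N (-(n ^ 2)) n]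
        have e1 : n ^ 2 + n + -(n ^ 2) = n := by ring
        have e2 : N + -(n ^ 2) = N - n * n := by ring
        rw [e1, e2]

-- ===== VERDICT (by name: the statement is the Claim_ definition above) =====
theorem reverse_mapping_magic1_spec : Claim_equal_reverse_mapping_magic1 := by
  intro N _ hPre
  unfold Spec_reverse_mapping_magic1
  exact reverse_mapping_magic1_eq N hPre
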